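-- pv_equiv track=rewrite | github.com/gangashman/recognition_digit | main.py | fit
-- ===== SOURCE A (Python) =====
-- def fit(train_data):
--     max_value = 0
--     fit_data = [[[] for _ in range(0, 28)] for _ in range(0, 28)]
--
--     for data, r in train_data:
--         for x, x_row in enumerate(data):
--             for y, y_value in enumerate(x_row):
--
--                 fit_data[x][y].append((y_value, r))
--
--                 if max_value < y_value:
--                     max_value = y_value
--
--     return fit_data, max_value
-- ===== SOURCE B (Python) =====
-- def fit(train_data):
--     # position-major: each of the 28x28 cells is built by its own scan over
--     # train_data; the max is a separate reduction floored at 0.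
--     fit_data = [[[(data[x][y], r) for data, r in train_data
--                   if x < len(data) and y < len(data[x])]
--                  for y in range(28)] for x in range(28)]
--     max_value = max([0] + [v for data, _ in train_data for row in data for v in row])
--     return fit_data, max_value
-- ===== Notes on version B (the rewrite author's own statement) =====
-- stated objective: alternative
-- what changed: Inverts the loop nesting: instead of one fused mutating pass over the samples that appends into a preallocated 28x28 grid while tracking the max, B builds the grid position-major by comprehension (one scan of train_data per cell) and computes the maximum as a separate reduction over all pixel values floored at 0.
import Mathlib
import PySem

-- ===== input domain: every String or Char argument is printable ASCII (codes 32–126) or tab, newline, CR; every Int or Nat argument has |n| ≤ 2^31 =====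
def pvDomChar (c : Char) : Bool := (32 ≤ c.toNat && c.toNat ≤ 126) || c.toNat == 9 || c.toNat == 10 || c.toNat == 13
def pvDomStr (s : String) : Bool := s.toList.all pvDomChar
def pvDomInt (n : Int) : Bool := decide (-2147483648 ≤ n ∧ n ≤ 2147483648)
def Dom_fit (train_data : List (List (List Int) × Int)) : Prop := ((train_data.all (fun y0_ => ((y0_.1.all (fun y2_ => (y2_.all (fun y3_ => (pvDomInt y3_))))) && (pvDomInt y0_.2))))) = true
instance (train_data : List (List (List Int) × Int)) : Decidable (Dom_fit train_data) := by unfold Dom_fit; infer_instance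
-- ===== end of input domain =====

-- B builds the grid position-major (one scan of train_data per cell) and takes the max as a
-- separate 0-floored reduction, instead of A's single fused mutating pass; alternative decomposition.


-- ===== PORT A =====
-- literal transliteration of A: fused foldl over the samples carrying the (grid, max) state;
-- fit_data[x][y].append(...) is List.modify at the (x, y) cell (indices from enumerate are ≥ 0,
-- so .toNat is exact; out-of-range x/y raises IndexError in Python and is excluded by Pre_fit).
def fit (train_data : List (List (List Int) × Int)) : (List (List (List (Int × Int)))) × Int :=
  let init : List (List (List (Int × Int))) :=
    (List.range 28).map (fun _ => (List.range 28).map (fun _ => ([] : List (Int × Int))))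
  train_data.foldl
    (fun st dr =>
      (PySem.List.enumerate dr.1).foldl
        (fun st2 xp =>
          (PySem.List.enumerate xp.2).foldl
            (fun st3 yp =>
              (st3.1.modify xp.1.toNat
                 (fun row => row.modify yp.1.toNat (fun cell => cell ++ [(yp.2, dr.2)])),
               if st3.2 < yp.2 then yp.2 else st3.2))
            st2)
        st)
    (init, 0)

-- ===== PORT B =====
-- B-side helpers: one cell of the position-major comprehension, and the grid of all cells
def cellB (train_data : List (List (List Int) × Int)) (x y : Nat) : List (Int × Int) :=
  train_data.filterMap (fun dr =>
    if x < dr.1.length ∧ y < (dr.1.getD x []).length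
    then some ((dr.1.getD x []).getD y 0, dr.2) else none)

def gridB (train_data : List (List (List Int) × Int)) : List (List (List (Int × Int))) :=
  (List.range 28).map (fun x => (List.range 28).map (fun y => cellB train_data x y))

def fit_alt (train_data : List (List (List Int) × Int)) : (List (List (List (Int × Int)))) × Int :=
  (gridB train_data,
   (train_data.flatMap (fun dr => dr.1.flatten)).foldl max 0)

-- ===== PRECONDITION & SPEC =====
-- Pre_fit excludes exactly the inputs where A raises IndexError: a sample with more than 28 rows
-- or a row with more than 28 pixels (fit_data[x][y] is indexed into a fixed 28x28 grid).
def Pre_fit (train_data : List (List (List Int) × Int)) : Prop :=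
  ∀ dr ∈ train_data, dr.1.length ≤ 28 ∧ ∀ row ∈ dr.1, row.length ≤ 28
instance (train_data : List (List (List Int) × Int)) : Decidable (Pre_fit train_data) := by unfold Pre_fit; infer_instance

def pvWitness_fit : (List (List (List Int) × Int)) := [([[3, 1], [2]], 7), ([[0]], 4)]

def Spec_fit (train_data : List (List (List Int) × Int)) (out : (List (List (List (Int × Int)))) × Int) : Prop := out = fit_alt train_data
instance (train_data : List (List (List Int) × Int)) (out : (List (List (List (Int × Int)))) × Int) : Decidable (Spec_fit train_data out) := by unfold Spec_fit; infer_instance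

-- ===== CLAIM (what is proved, stated in full; the proofs are below) =====
def Claim_equal_fit : Prop := ∀ (train_data : List (List (List Int) × Int)), Dom_fit train_data → Pre_fit train_data → Spec_fit train_data (fit train_data)

-- ===== LEMMAS AND PROOFS =====

-- a foldl whose step acts componentwise on a pair splits into two foldls
theorem pv_foldl_pair {α β γ : Type} (l : List γ) (f1 : α → γ → α) (f2 : β → γ → β)
    (a : α) (b : β) :
    l.foldl (fun p x => (f1 p.1 x, f2 p.2 x)) (a, b) = (l.foldl f1 a, l.foldl f2 b) := by
  induction l generalizing a b with
  | nil => rfl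
  | cons h t ih => simp [List.foldl_cons, ih]

-- a foldl that ignores the indices of enumerate is a foldl over the list itself
theorem pv_foldl_enumerate {α β : Type} (l : List α) (s : Int) (g : β → α → β) (b : β) :
    (PySem.List.enumerate l s).foldl (fun a p => g a p.2) b = l.foldl g b := by
  have := @List.foldl_map (Int × α) α β (fun p => p.2) g (PySem.List.enumerate l s) b
  rw [PySem.List.map_snd_enumerate] at this
  exact this.symm

-- a foldl of modifies at one fixed index is one modify with the folded function
theorem pv_foldl_modify {α γ : Type} (l : List γ) (i : Nat) (F : γ → α → α)
    (g : List α) :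
    l.foldl (fun g p => g.modify i (F p)) g = g.modify i (fun a => l.foldl (fun a p => F p a) a) := by
  induction l generalizing g with
  | nil => exact (List.modify_id _ _).symm
  | cons h t ih =>
    simp only [List.foldl_cons, ih, List.modify_modify_eq]
    rfl

-- the inner row update: append (row[y], r) to cell y for every y < row.length
def rowUpd (gr : List (List (Int × Int))) (row : List Int) (r : Int) : List (List (Int × Int)) :=
  (PySem.List.enumerate row).foldl
    (fun gr yp => gr.modify yp.1.toNat (fun cell => cell ++ [(yp.2, r)])) gr

theorem rowUpd_get (gr : List (List (Int × Int))) (row : List Int) (r : Int) (j : Nat) :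
    (rowUpd gr row r)[j]? =
      gr[j]?.map (fun c => if j < row.length then c ++ [(row.getD j 0, r)] else c) := by
  induction row using List.reverseRecOn with
  | nil =>
    simp [rowUpd, PySem.List.enumerate_nil]
  | append_singleton row a ih =>
    have hen : PySem.List.enumerate (row ++ [a]) 0
        = PySem.List.enumerate row 0 ++ [((row.length : Int), a)] := by
      rw [PySem.List.enumerate_append]
      simp [PySem.List.enumerate_cons, PySem.List.enumerate_nil]
    unfold rowUpd at ih ⊢
    rw [hen, List.foldl_append]
    simp only [List.foldl_cons, List.foldl_nil]
    rw [List.getElem?_modify]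
    simp only [Int.toNat_natCast]
    rw [ih]
    rcases Nat.lt_trichotomy j row.length with h | h | h
    · have h1 : j < row.length + 1 := by omega
      have h2 : row.length ≠ j := by omega
      simp [h, h1, h2, List.getD]
    · subst h
      simp [List.getD]
    · have h1 : ¬ j < row.length := by omega
      have h2 : ¬ j < row.length + 1 := by omega
      have h3 : row.length ≠ j := by omega
      simp [h1, h2, h3]

-- one sample: modify row x by rowUpd with sample row x, for every x < d.length
def sampleFold (g : List (List (List (Int × Int)))) (d : List (List Int)) (r : Int) :
    List (List (List (Int × Int))) :=
  (PySem.List.enumerate d).foldl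
    (fun g xp =>
      (PySem.List.enumerate xp.2).foldl
        (fun g yp => g.modify xp.1.toNat (fun gr => gr.modify yp.1.toNat (fun cell => cell ++ [(yp.2, r)])))
        g)
    g

theorem sampleFold_eq (g : List (List (List (Int × Int)))) (d : List (List Int)) (r : Int) :
    sampleFold g d r =
      (PySem.List.enumerate d).foldl (fun g xp => g.modify xp.1.toNat (fun gr => rowUpd gr xp.2 r)) g := by
  unfold sampleFold
  congr 1
  funext g2 xp
  exact pv_foldl_modify (PySem.List.enumerate xp.2) xp.1.toNat
    (fun yp gr => gr.modify yp.1.toNat (fun cell => cell ++ [(yp.2, r)])) g2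

theorem sampleFold_get (g : List (List (List (Int × Int)))) (d : List (List Int)) (r : Int) (x : Nat) :
    (sampleFold g d r)[x]? =
      g[x]?.map (fun gr => if x < d.length then rowUpd gr (d.getD x []) r else gr) := by
  rw [sampleFold_eq]
  induction d using List.reverseRecOn generalizing g with
  | nil =>
    simp [PySem.List.enumerate_nil]
  | append_singleton d a ih =>
    have hen : PySem.List.enumerate (d ++ [a]) 0
        = PySem.List.enumerate d 0 ++ [((d.length : Int), a)] := by
      rw [PySem.List.enumerate_append]
      simp [PySem.List.enumerate_cons, PySem.List.enumerate_nil]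
    rw [hen, List.foldl_append]
    simp only [List.foldl_cons, List.foldl_nil]
    rw [List.getElem?_modify]
    simp only [Int.toNat_natCast]
    rw [ih]
    rcases Nat.lt_trichotomy x d.length with h | h | h
    · have h1 : x < d.length + 1 := by omega
      have h2 : d.length ≠ x := by omega
      simp [h, h1, h2, List.getD]
    · subst h
      simp [List.getD]
    · have h1 : ¬ x < d.length := by omega
      have h2 : ¬ x < d.length + 1 := by omega
      have h3 : d.length ≠ x := by omega
      simp [h1, h2, h3]

theorem cellB_append (pre : List (List (List Int) × Int)) (d : List (List Int)) (r : Int) (x y : Nat) :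
    cellB (pre ++ [(d, r)]) x y =
      cellB pre x y ++
        (if x < d.length ∧ y < (d.getD x []).length then [((d.getD x []).getD y 0, r)] else []) := by
  unfold cellB
  rw [List.filterMap_append]
  congr 1
  by_cases h : x < d.length ∧ y < (d.getD x []).length
  · simp only [List.filterMap_cons, if_pos h, List.filterMap_nil]
  · simp only [List.filterMap_cons, if_neg h, List.filterMap_nil]

theorem sampleFold_gridB (pre : List (List (List Int) × Int)) (d : List (List Int)) (r : Int) :
    sampleFold (gridB pre) d r = gridB (pre ++ [(d, r)]) := by
  apply List.ext_getElem?
  intro x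
  rw [sampleFold_get]
  by_cases hx : x < 28
  · simp only [gridB, List.getElem?_map, List.getElem?_range hx, Option.map_some]
    congr 1
    by_cases hxd : x < d.length
    · rw [if_pos hxd]
      apply List.ext_getElem?
      intro y
      rw [rowUpd_get]
      by_cases hy : y < 28
      · simp only [List.getElem?_map, List.getElem?_range hy, Option.map_some]
        rw [cellB_append]
        simp only [hxd, true_and, List.getD]
        split <;> simp
      · have h1 : ((List.range 28).map (cellB pre x)).length ≤ y := by simpa using Nat.le_of_not_lt hy
        have h2 : ((List.range 28).map (cellB (pre ++ [(d, r)]) x)).length ≤ y := by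
          simpa using Nat.le_of_not_lt hy
        rw [List.getElem?_eq_none h1, List.getElem?_eq_none h2]
        rfl
    · rw [if_neg hxd]
      apply List.map_congr_left
      intro y _
      rw [cellB_append]
      simp [hxd]
  · have h1 : (gridB pre).length ≤ x := by simp [gridB]; omega
    have h2 : (gridB (pre ++ [(d, r)])).length ≤ x := by simp [gridB]; omega
    rw [List.getElem?_eq_none h1, List.getElem?_eq_none h2]
    rfl

theorem grid_fold (td pre : List (List (List Int) × Int)) :
    td.foldl (fun g dr => sampleFold g dr.1 dr.2) (gridB pre) = gridB (pre ++ td) := by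
  induction td generalizing pre with
  | nil => simp
  | cons h t ih =>
    simp only [List.foldl_cons, sampleFold_gridB pre h.1 h.2]
    have := ih (pre ++ [(h.1, h.2)])
    simpa using this

theorem max_fold (td : List (List (List Int) × Int)) :
    td.foldl
      (fun m dr =>
        (PySem.List.enumerate dr.1).foldl
          (fun m2 xp =>
            (PySem.List.enumerate xp.2).foldl (fun m3 yp => if m3 < yp.2 then yp.2 else m3) m2)
          m)
      0 = (td.flatMap (fun dr => dr.1.flatten)).foldl max 0 := by
  have hstep : (fun (m v : Int) => if m < v then v else m) = (fun (m v : Int) => max m v) := by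
    funext m v
    by_cases h : m < v
    · simp only [if_pos h]
      exact (max_eq_right (le_of_lt h)).symm
    · simp only [if_neg h]
      exact (max_eq_left (by omega)).symm
  have h1 : ∀ (dr : List (List Int) × Int) (m : Int),
      (PySem.List.enumerate dr.1).foldl
        (fun m2 xp =>
          (PySem.List.enumerate xp.2).foldl (fun m3 yp => if m3 < yp.2 then yp.2 else m3) m2) m
      = (dr.1.flatten).foldl max m := by
    intro dr m
    have h2 : (fun (m2 : Int) (xp : Int × List Int) =>
          (PySem.List.enumerate xp.2).foldl (fun m3 yp => if m3 < yp.2 then yp.2 else m3) m2)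
        = (fun m2 xp => xp.2.foldl (fun m3 v => if m3 < v then v else m3) m2) := by
      funext m2 xp
      exact pv_foldl_enumerate xp.2 0 (fun a v => if a < v then v else a) m2
    rw [h2, pv_foldl_enumerate dr.1 0
      (fun m2 row => row.foldl (fun m3 v => if m3 < v then v else m3) m2) m,
      List.foldl_flatten]
    simp only [hstep]
  calc td.foldl
        (fun m dr =>
          (PySem.List.enumerate dr.1).foldl
            (fun m2 xp =>
              (PySem.List.enumerate xp.2).foldl (fun m3 yp => if m3 < yp.2 then yp.2 else m3) m2) m)
        0
      = td.foldl (fun m dr => dr.1.flatten.foldl max m) 0 := by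
        congr 1
        funext m dr
        exact h1 dr m
    _ = (td.flatMap (fun dr => dr.1.flatten)).foldl max 0 := by
        rw [List.flatMap_def, List.foldl_flatten, List.foldl_map]

-- ===== VERDICT (by name: the statement is the Claim_ definition above) =====
-- the fused pair-state fold of A splits into its grid component and its max component
theorem fit_split (td : List (List (List Int) × Int))
    (g : List (List (List (Int × Int)))) (m : Int) :
    td.foldl
      (fun st dr =>
        (PySem.List.enumerate dr.1).foldl
          (fun st2 xp =>
            (PySem.List.enumerate xp.2).foldl
              (fun st3 yp =>
                (st3.1.modify xp.1.toNat
                   (fun row => row.modify yp.1.toNat (fun cell => cell ++ [(yp.2, dr.2)])),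
                 if st3.2 < yp.2 then yp.2 else st3.2))
              st2)
          st)
      (g, m)
    = (td.foldl (fun g dr => sampleFold g dr.1 dr.2) g,
       td.foldl
         (fun m dr =>
           (PySem.List.enumerate dr.1).foldl
             (fun m2 xp =>
               (PySem.List.enumerate xp.2).foldl (fun m3 yp => if m3 < yp.2 then yp.2 else m3) m2)
             m)
         m) := by
  induction td generalizing g m with
  | nil => rfl
  | cons dr t ih =>
    simp only [List.foldl_cons]
    have hin : (fun (st2 : List (List (List (Int × Int))) × Int) (xp : Int × List Int) =>
          (PySem.List.enumerate xp.2).foldl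
            (fun st3 yp =>
              (st3.1.modify xp.1.toNat
                 (fun row => row.modify yp.1.toNat (fun cell => cell ++ [(yp.2, dr.2)])),
               if st3.2 < yp.2 then yp.2 else st3.2))
            st2)
        = (fun st2 xp =>
            ((PySem.List.enumerate xp.2).foldl
               (fun g3 yp =>
                 g3.modify xp.1.toNat
                   (fun row => row.modify yp.1.toNat (fun cell => cell ++ [(yp.2, dr.2)])))
               st2.1,
             (PySem.List.enumerate xp.2).foldl (fun m3 yp => if m3 < yp.2 then yp.2 else m3)
               st2.2)) := by
      funext st2 xp
      obtain ⟨g2, m2⟩ := st2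
      exact pv_foldl_pair (PySem.List.enumerate xp.2)
        (fun g3 yp =>
          g3.modify xp.1.toNat
            (fun row => row.modify yp.1.toNat (fun cell => cell ++ [(yp.2, dr.2)])))
        (fun m3 yp => if m3 < yp.2 then yp.2 else m3) g2 m2
    have hstep :
        (PySem.List.enumerate dr.1).foldl
          (fun st2 xp =>
            (PySem.List.enumerate xp.2).foldl
              (fun st3 yp =>
                (st3.1.modify xp.1.toNat
                   (fun row => row.modify yp.1.toNat (fun cell => cell ++ [(yp.2, dr.2)])),
                 if st3.2 < yp.2 then yp.2 else st3.2))
              st2)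
          (g, m)
        = (sampleFold g dr.1 dr.2,
           (PySem.List.enumerate dr.1).foldl
             (fun m2 xp =>
               (PySem.List.enumerate xp.2).foldl (fun m3 yp => if m3 < yp.2 then yp.2 else m3) m2)
             m) := by
      rw [hin]
      exact pv_foldl_pair (PySem.List.enumerate dr.1)
        (fun g2 xp =>
          (PySem.List.enumerate xp.2).foldl
            (fun g3 yp =>
              g3.modify xp.1.toNat
                (fun row => row.modify yp.1.toNat (fun cell => cell ++ [(yp.2, dr.2)])))
            g2)
        (fun m2 xp =>
          (PySem.List.enumerate xp.2).foldl (fun m3 yp => if m3 < yp.2 then yp.2 else m3) m2)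
        g m
    rw [hstep]
    exact ih _ _

theorem gridB_nil : gridB [] =
    (List.range 28).map (fun _ => (List.range 28).map (fun _ => ([] : List (Int × Int)))) := by
  simp [gridB, cellB]

-- ===== VERDICT (by name: the statement is the Claim_ definition above) =====
theorem fit_spec : Claim_equal_fit := by
  intro td _ _
  unfold Spec_fit fit fit_alt
  rw [fit_split]
  refine Prod.ext ?_ ?_
  · show td.foldl (fun g dr => sampleFold g dr.1 dr.2)
        ((List.range 28).map (fun _ => (List.range 28).map (fun _ => ([] : List (Int × Int)))))
      = gridB td
    rw [← gridB_nil, grid_fold]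
    simp
  · show td.foldl
        (fun m dr =>
          (PySem.List.enumerate dr.1).foldl
            (fun m2 xp =>
              (PySem.List.enumerate xp.2).foldl (fun m3 yp => if m3 < yp.2 then yp.2 else m3) m2)
            m)
        0
      = (td.flatMap (fun dr => dr.1.flatten)).foldl max 0
    exact max_fold td
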